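-- pv_equiv track=rewrite | github.com/Amryu/Entropia-Nexus | client/streaming/twitch_chat.py | parse_badges_tag
-- ===== SOURCE A (Python) =====
-- def parse_badges_tag(badges_str: str) -> list[str]:
--     """Parse the 'badges' IRC tag into a list of badge type strings.
--
--     Format: ``broadcaster/1,subscriber/12,moderator/1``
--     Returns: ``["broadcaster", "subscriber", "moderator"]``
--     """
--     if not badges_str:
--         return []
--     result = []
--     for badge in badges_str.split(","):
--         if "/" in badge:
--             badge_type, _, _ = badge.partition("/")
--             result.append(badge_type)
--     return result
-- ===== SOURCE B (Python) =====
-- def parse_badges_tag(badges_str: str) -> list[str]: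
--     """Single character-by-character scan: build each badge-type prefix as we go,
--     emit it at each comma (or at the end) only if a '/' was seen in the token."""
--     result = []
--     cur = []
--     seen = False
--     for ch in badges_str:
--         if ch == ',':
--             if seen:
--                 result.append(''.join(cur))
--             cur = []
--             seen = False
--         elif ch == '/':
--             seen = True
--         elif not seen:
--             cur.append(ch)
--     if seen:
--         result.append(''.join(cur))
--     return result
-- ===== Notes on version B (the rewrite author's own statement) =====
-- stated objective: alternative
-- what changed: Replaces split(',') + per-token '/' membership test + partition('/') with a single character-by-character scan that accumulates each badge-type prefix directly and emits it at commas only when a slash was seen.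
import Mathlib
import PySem

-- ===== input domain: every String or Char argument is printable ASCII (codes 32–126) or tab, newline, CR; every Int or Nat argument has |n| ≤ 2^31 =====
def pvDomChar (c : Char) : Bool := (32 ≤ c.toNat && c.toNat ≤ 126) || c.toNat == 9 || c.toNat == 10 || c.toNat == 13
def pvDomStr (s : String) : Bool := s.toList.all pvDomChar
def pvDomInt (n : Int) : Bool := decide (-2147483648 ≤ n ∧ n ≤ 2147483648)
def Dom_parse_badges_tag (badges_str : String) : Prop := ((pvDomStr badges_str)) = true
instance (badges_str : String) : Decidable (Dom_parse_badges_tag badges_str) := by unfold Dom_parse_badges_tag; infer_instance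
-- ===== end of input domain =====

-- B replaces split/partition over comma-tokens by one character-by-character scan; objective: alternative (same cost, different traversal).


-- ===== PORT A =====
-- badge.partition("/") under the guard '"/" in badge': the first component is the prefix
-- before the first '/', i.e. takeWhile (· ≠ '/') — exact for the single-char separator.
def parse_badges_tag (badges_str : String) : List String :=
  if badges_str = "" then []
  else
    (PySem.Chars.splitOn badges_str.toList [',']).foldl
      (fun result badge =>
        if PySem.Chars.isIn ['/'] badge then
          result ++ [String.ofList (badge.takeWhile (· ≠ '/'))]
        else result) []

-- ===== PORT B =====
-- one scan with state (result, cur, seen); emit cur at ',' iff a '/' was seen in the token.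
def pvStepB : (List String × List Char × Bool) → Char → (List String × List Char × Bool)
  | (res, cur, seen), c =>
    if c = ',' then ((if seen then res ++ [String.ofList cur] else res), [], false)
    else if c = '/' then (res, cur, true)
    else if seen then (res, cur, seen) else (res, cur ++ [c], seen)

def parse_badges_tag_alt (badges_str : String) : List String :=
  let st := badges_str.toList.foldl pvStepB ([], [], false)
  if st.2.2 then st.1 ++ [String.ofList st.2.1] else st.1

-- ===== PRECONDITION & SPEC =====
def Spec_parse_badges_tag (badges_str : String) (out : List String) : Prop := out = parse_badges_tag_alt badges_str
instance (badges_str : String) (out : List String) : Decidable (Spec_parse_badges_tag badges_str out) := by unfold Spec_parse_badges_tag; infer_instance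

-- ===== CLAIM (what is proved, stated in full; the proofs are below) =====
def Claim_equal_parse_badges_tag : Prop := ∀ (badges_str : String), Dom_parse_badges_tag badges_str → Spec_parse_badges_tag badges_str (parse_badges_tag badges_str)

-- ===== LEMMAS AND PROOFS =====

/-- Structural single-char-separator split; `cur` is the reversed current piece. -/
def pvSplitAux : List Char → List Char → List (List Char)
  | [], cur => [cur.reverse]
  | c :: rest, cur =>
    if c = ',' then cur.reverse :: pvSplitAux rest [] else pvSplitAux rest (c :: cur)

lemma pvGo_eq : ∀ (fuel : Nat) (l cur : List Char) (acc : List (List Char)),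
    l.length < fuel →
    PySem.Chars.splitOn.go [','] fuel l cur acc = acc.reverse ++ pvSplitAux l cur := by
  intro fuel
  induction fuel with
  | zero => intro l cur acc h; omega
  | succ n ih =>
    intro l cur acc h
    cases l with
    | nil => simp [PySem.Chars.splitOn.go, pvSplitAux]
    | cons c rest =>
      by_cases hc : c = ','
      · subst hc
        have hpre : [','].isPrefixOf (',' :: rest) = true := by
          simp [List.isPrefixOf]
        rw [show PySem.Chars.splitOn.go [','] (n+1) (',' :: rest) cur acc
              = PySem.Chars.splitOn.go [','] n (List.drop [','].length (',' :: rest)) []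
                  (cur.reverse :: acc) from by
            simp [PySem.Chars.splitOn.go, hpre]]
        simp only [List.length_singleton, List.drop_succ_cons, List.drop_zero]
        rw [ih rest [] (cur.reverse :: acc) (by simp at h; omega)]
        simp [pvSplitAux]
      · have hpre : [','].isPrefixOf (c :: rest) = false := by
          simp [List.isPrefixOf]
          exact Ne.symm hc
        rw [show PySem.Chars.splitOn.go [','] (n+1) (c :: rest) cur acc
              = PySem.Chars.splitOn.go [','] n rest (c :: cur) acc from by
            simp [PySem.Chars.splitOn.go, hpre]]
        rw [ih rest (c :: cur) acc (by simp at h ⊢; omega)]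
        simp [pvSplitAux, hc]

lemma pvSplitOn_eq (cs : List Char) :
    PySem.Chars.splitOn cs [','] = pvSplitAux cs [] := by
  have := pvGo_eq (cs.length + 1) cs [] [] (by omega)
  simpa [PySem.Chars.splitOn] using this

lemma pvIsIn_slash (t : List Char) : PySem.Chars.isIn ['/'] t = t.contains '/' := by
  by_cases h : '/' ∈ t
  · rw [(PySem.Chars.isIn_iff_infix _ _).2 ((List.singleton_infix_iff _ _).2 h)]
    simp [h]
  · have h2 : ¬ PySem.Chars.isIn ['/'] t = true := by
      rw [PySem.Chars.isIn_iff_infix, List.singleton_infix_iff]; exact h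
    simp only [Bool.not_eq_true] at h2
    simp [h2, h]

/-- The filter-map A performs on the token list. -/
def pvTok (t : List Char) : List String :=
  if t.contains '/' then [String.ofList (t.takeWhile (· ≠ '/'))] else []

/-- The tail of B's scan, as a function of the remaining characters and current token state. -/
def pvG : List Char → List Char → Bool → List String
  | [], cur, seen => if seen then [String.ofList cur] else []
  | c :: cs, cur, seen =>
    if c = ',' then (if seen then [String.ofList cur] else []) ++ pvG cs [] false
    else if c = '/' then pvG cs cur true
    else pvG cs (if seen then cur else cur ++ [c]) seen

lemma pvFoldB (cs : List Char) : ∀ (res : List String) (cur : List Char) (seen : Bool),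
    (let st := cs.foldl pvStepB (res, cur, seen)
     if st.2.2 then st.1 ++ [String.ofList st.2.1] else st.1) = res ++ pvG cs cur seen := by
  induction cs with
  | nil => intro res cur seen; cases seen <;> simp [pvG]
  | cons c cs ih =>
    intro res cur seen
    by_cases hc : c = ','
    · subst hc
      simp only [List.foldl_cons, pvStepB, pvG]
      rw [ih]
      cases seen <;> simp
    · by_cases hs : c = '/'
      · subst hs
        simp only [List.foldl_cons, pvStepB, if_neg hc, pvG]
        rw [if_pos trivial, if_pos trivial]
        rw [ih]
      · simp only [List.foldl_cons, pvStepB, if_neg hc, if_neg hs, pvG]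
        cases seen
        · simp only [Bool.false_eq_true, if_false]
          rw [ih]
        · simp only [if_true]
          rw [ih]

lemma pvTW_slash (t : List Char) :
    (t ++ ['/']).takeWhile (· ≠ '/') = t.takeWhile (· ≠ '/') := by
  induction t with
  | nil => rfl
  | cons a t ih =>
    by_cases ha : a = '/'
    · subst ha
      simp only [List.cons_append, List.takeWhile_cons]
      rw [if_neg (by simp), if_neg (by simp)]
    · simp only [List.cons_append, List.takeWhile_cons]
      rw [if_pos (by simp [ha]), if_pos (by simp [ha]), ih]

lemma pvTW_nomem (t : List Char) (c : Char) (hcne : c ≠ '/') (hnin : '/' ∉ t) :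
    (t ++ [c]).takeWhile (· ≠ '/') = t.takeWhile (· ≠ '/') ++ [c] := by
  induction t with
  | nil => simp [List.takeWhile, hcne]
  | cons a t ih =>
    have ha : a ≠ '/' := fun h => hnin (h ▸ List.mem_cons_self)
    simp only [List.cons_append, List.takeWhile_cons]
    rw [if_pos (by simp [ha]), if_pos (by simp [ha]),
      ih (fun h => hnin (List.mem_cons_of_mem _ h))]
    rfl

lemma pvTW_mem (t : List Char) (c : Char) (hin : '/' ∈ t) :
    (t ++ [c]).takeWhile (· ≠ '/') = t.takeWhile (· ≠ '/') := by
  induction t with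
  | nil => cases hin
  | cons a t ih =>
    by_cases ha : a = '/'
    · subst ha
      simp only [List.cons_append, List.takeWhile_cons]
      rw [if_neg (by simp), if_neg (by simp)]
    · have hin' : '/' ∈ t := by
        cases hin with
        | head => exact absurd rfl ha
        | tail _ h => exact h
      simp only [List.cons_append, List.takeWhile_cons]
      rw [if_pos (by simp [ha]), if_pos (by simp [ha]), ih hin']

lemma pvG_eq_splitAux (cs : List Char) : ∀ (t : List Char),
    pvG cs (t.takeWhile (· ≠ '/')) (t.contains '/') =
      (pvSplitAux cs t.reverse).flatMap pvTok := by
  induction cs with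
  | nil =>
    intro t
    simp [pvG, pvSplitAux, pvTok]
  | cons c cs ih =>
    intro t
    by_cases hc : c = ','
    · subst hc
      have h0 := ih []
      simp only [List.takeWhile_nil, List.contains_nil, List.reverse_nil] at h0
      simp only [pvG, pvSplitAux]
      rw [h0]
      simp [pvTok]
    · by_cases hs : c = '/'
      · subst hs
        have h := ih (t ++ ['/'])
        rw [pvTW_slash, List.reverse_append] at h
        simp only [List.contains_append, List.contains_cons, BEq.rfl, Bool.true_or,
          Bool.or_true, List.reverse_cons, List.reverse_nil, List.nil_append,
          List.singleton_append] at h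
        simp only [pvG, pvSplitAux, if_neg hc]
        exact h
      · have h := ih (t ++ [c])
        have hcont : (t ++ [c]).contains '/' = t.contains '/' := by
          simp [Ne.symm hs]
        rw [hcont, List.reverse_append] at h
        simp only [List.reverse_cons, List.reverse_nil, List.nil_append,
          List.singleton_append] at h
        simp only [pvG, pvSplitAux, if_neg hc, if_neg hs]
        cases hin : t.contains '/' with
        | true =>
          rw [pvTW_mem t c (by simpa using hin), hin] at h
          rw [if_pos rfl]
          exact h
        | false =>
          rw [pvTW_nomem t c hs (by simpa using hin), hin] at h
          rw [if_neg (by simp)]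
          exact h

lemma pvA_eq (cs : List Char) :
    (PySem.Chars.splitOn cs [',']).foldl
      (fun result badge =>
        if PySem.Chars.isIn ['/'] badge then
          result ++ [String.ofList (badge.takeWhile (· ≠ '/'))]
        else result) [] = (pvSplitAux cs []).flatMap pvTok := by
  rw [pvSplitOn_eq,
    PySem.List.foldl_append_if (fun badge => PySem.Chars.isIn ['/'] badge)
      (fun badge => String.ofList (badge.takeWhile (· ≠ '/'))) (pvSplitAux cs []) []]
  simp only [List.nil_append]
  rw [show (fun badge : List Char => PySem.Chars.isIn ['/'] badge)
        = (fun badge : List Char => badge.contains '/') from funext pvIsIn_slash]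
  induction pvSplitAux cs [] with
  | nil => simp
  | cons t ts ih =>
    simp only [List.filter_cons, List.flatMap_cons]
    cases h : t.contains '/'
    · rw [if_neg (by simp)]
      simp only [pvTok, h, Bool.false_eq_true, if_false, List.nil_append]
      exact ih
    · rw [if_pos (by simp)]
      simp only [pvTok, h, if_true, List.map_cons, List.singleton_append]
      rw [ih]

-- ===== VERDICT (by name: the statement is the Claim_ definition above) =====
theorem parse_badges_tag_spec : Claim_equal_parse_badges_tag := by
  intro s _
  unfold Spec_parse_badges_tag parse_badges_tag parse_badges_tag_alt
  have hB := pvFoldB s.toList [] [] false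
  simp only at hB
  rw [hB]
  have hG := pvG_eq_splitAux s.toList []
  simp only [List.takeWhile_nil, List.contains_nil, List.reverse_nil] at hG
  by_cases hs : s = ""
  · subst hs
    simp [pvG]
  · rw [if_neg hs, pvA_eq, ← hG]
    simp
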